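-- pv_equiv track=rewrite | github.com/delli-88/dsa_coding | dp/3d_array/chocolates_pickup.py | solve
-- ===== SOURCE A (Python) =====
-- from math import inf
--
-- def solve(n, m, grid):
--
--     dp = [[[-1 for _ in range(m)] for _ in range(m)] for _ in range(n)]
--
--     for r in range(n-1,-1,-1):
--         for c1 in range(m):
--             for c2 in range(m):
--                 if r==n-1:
--                     if c1==c2:
--                         dp[r][c1][c2] = grid[r][c1]
--                     else:
--                         dp[r][c1][c2] = grid[r][c1]+grid[r][c2]
--                 else:
--
--                     if c1==c2:
--                         choco_count = grid[r][c1]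
--                     else:
--                         choco_count = grid[r][c1]+grid[r][c2]
--
--                     col_dirs = [-1,0,1]
--                     maxi = 0
--
--                     for i in range(3):
--                         for j in range(3):
--                             pickup = -inf
--                             if c1+ col_dirs[i]>=0 and c1+ col_dirs[i]<m and c2+col_dirs[j]>=0 and c2+col_dirs[j]<m:
--                                 pickup = dp[r+1][c1+ col_dirs[i]][c2+col_dirs[j]]
--                             maxi = max(maxi, choco_count + pickup)
--                     dp[r][c1][c2] = maxi
--     return dp[0][0][-1]
-- ===== SOURCE B (Python) =====
-- def solve(n, m, grid):
--     # top-down memoized recursion instead of a bottom-up 3D table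
--     memo = {}
--
--     def rec(r, c1, c2):
--         key = (r, c1, c2)
--         if key in memo:
--             return memo[key]
--         choco = grid[r][c1] if c1 == c2 else grid[r][c1] + grid[r][c2]
--         if r == n - 1:
--             val = choco
--         else:
--             val = 0
--             for d1 in (-1, 0, 1):
--                 for d2 in (-1, 0, 1):
--                     a, b = c1 + d1, c2 + d2
--                     if 0 <= a < m and 0 <= b < m:
--                         val = max(val, choco + rec(r + 1, a, b))
--         memo[key] = val
--         return val
--
--     return rec(0, 0, m - 1)
-- ===== Notes on version B (the rewrite author's own statement) =====
-- stated objective: alternative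
-- what changed: Replaces the bottom-up 3D DP table filled by triple nested index loops with a top-down memoized recursion over states (row, col1, col2) started from the single needed root state.
import Mathlib
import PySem

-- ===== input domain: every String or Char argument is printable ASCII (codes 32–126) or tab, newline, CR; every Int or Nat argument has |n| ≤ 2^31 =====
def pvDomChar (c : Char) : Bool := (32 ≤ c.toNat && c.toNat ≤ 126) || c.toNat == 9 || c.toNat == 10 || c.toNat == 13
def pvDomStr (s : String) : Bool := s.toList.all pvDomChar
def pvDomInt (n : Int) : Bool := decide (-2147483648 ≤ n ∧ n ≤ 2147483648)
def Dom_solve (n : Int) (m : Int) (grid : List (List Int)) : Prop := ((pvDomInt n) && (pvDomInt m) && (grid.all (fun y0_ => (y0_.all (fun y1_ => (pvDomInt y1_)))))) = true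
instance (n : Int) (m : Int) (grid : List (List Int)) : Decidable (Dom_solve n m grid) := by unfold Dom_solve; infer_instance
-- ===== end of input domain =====

-- B changes the decomposition: top-down memoized recursion instead of A's bottom-up 3D table; same result, same asymptotic cost.

-- ===== PORT A =====
-- grid[r][c] for the nonnegative in-range indices both programs use (exact under Pre_solve)
def gRow (grid : List (List Int)) (r c : Int) : Int :=
  PySem.List.pyGetD (PySem.List.pyGetD grid r []) c 0

-- dp[r][c1][c2] read / write; all three indices are nonnegative and in range under Pre_solve
def get3 (dp : List (List (List Int))) (r c1 c2 : Int) : Int :=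
  ((dp.getD r.toNat []).getD c1.toNat []).getD c2.toNat 0

def set3 (dp : List (List (List Int))) (r c1 c2 : Int) (v : Int) : List (List (List Int)) :=
  let row := dp.getD r.toNat []
  let inner := row.getD c1.toNat []
  dp.set r.toNat (row.set c1.toNat (inner.set c2.toNat v))

def solve (n : Int) (m : Int) (grid : List (List Int)) : Int :=
  let dp : List (List (List Int)) :=
    (PySem.List.pyRange 0 n 1).map (fun _ =>
      (PySem.List.pyRange 0 m 1).map (fun _ =>
        (PySem.List.pyRange 0 m 1).map (fun _ => (-1 : Int))))
  let dp := (PySem.List.pyRange (n-1) (-1) (-1)).foldl (fun dp r =>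
    (PySem.List.pyRange 0 m 1).foldl (fun dp c1 =>
      (PySem.List.pyRange 0 m 1).foldl (fun dp c2 =>
        if r = n - 1 then
          if c1 = c2 then set3 dp r c1 c2 (gRow grid r c1)
          else set3 dp r c1 c2 (gRow grid r c1 + gRow grid r c2)
        else
          let choco := if c1 = c2 then gRow grid r c1 else gRow grid r c1 + gRow grid r c2
          let colDirs : List Int := [-1, 0, 1]
          -- pickup = -inf when the move is out of range; max(maxi, choco + -inf) leaves maxi, so that case keeps maxi (exact)
          let maxi := (PySem.List.pyRange 0 3 1).foldl (fun maxi i =>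
            (PySem.List.pyRange 0 3 1).foldl (fun maxi j =>
              let di := colDirs.getD i.toNat 0
              let dj := colDirs.getD j.toNat 0
              if 0 ≤ c1 + di ∧ c1 + di < m ∧ 0 ≤ c2 + dj ∧ c2 + dj < m then
                max maxi (choco + get3 dp (r+1) (c1+di) (c2+dj))
              else maxi) maxi) 0
          set3 dp r c1 c2 maxi) dp) dp) dp
  PySem.List.pyGetD (PySem.List.pyGetD (PySem.List.pyGetD dp 0 []) 0 []) (-1) 0

-- ===== PORT B =====
-- memoized top-down recursion; fuel (a port artifact for termination) starts at n.toNat, strictly more than the recursion depth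
def recB (n m : Int) (grid : List (List Int)) :
    Nat → Int → Int → Int → PySem.Dict (Int × Int × Int) Int → Int × PySem.Dict (Int × Int × Int) Int
  | fuel, r, c1, c2, memo =>
    match memo.get? (r, c1, c2) with
    | some v => (v, memo)
    | none =>
      let choco := if c1 = c2 then gRow grid r c1 else gRow grid r c1 + gRow grid r c2
      let p : Int × PySem.Dict (Int × Int × Int) Int :=
        if r = n - 1 then (choco, memo)
        else
          match fuel with
          | 0 => (0, memo)  -- never reached from solve_alt
          | fuel' + 1 =>
            ([-1, 0, 1] : List Int).foldl (fun st d1 =>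
              ([-1, 0, 1] : List Int).foldl (fun st d2 =>
                if 0 ≤ c1 + d1 ∧ c1 + d1 < m ∧ 0 ≤ c2 + d2 ∧ c2 + d2 < m then
                  let q := recB n m grid fuel' (r + 1) (c1 + d1) (c2 + d2) st.2
                  (max st.1 (choco + q.1), q.2)
                else st) st) (0, memo)
      (p.1, p.2.insert (r, c1, c2) p.1)

def solve_alt (n : Int) (m : Int) (grid : List (List Int)) : Int :=
  (recB n m grid n.toNat 0 0 (m - 1) PySem.Dict.empty).1

-- ===== PRECONDITION & SPEC =====
-- Pre_solve is exactly where the Python A returns: n, m ≥ 1, at least n rows, and each of the first n rows has at least m entries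
def Pre_solve (n : Int) (m : Int) (grid : List (List Int)) : Prop :=
  1 ≤ n ∧ 1 ≤ m ∧ n ≤ (grid.length : Int) ∧ ∀ row ∈ grid.take n.toNat, m ≤ (row.length : Int)
instance (n : Int) (m : Int) (grid : List (List Int)) : Decidable (Pre_solve n m grid) := by unfold Pre_solve; infer_instance

def pvWitness_solve : Int × Int × List (List Int) := (2, 2, [[1, 2], [3, 4]])

def Spec_solve (n : Int) (m : Int) (grid : List (List Int)) (out : Int) : Prop := out = solve_alt n m grid
instance (n : Int) (m : Int) (grid : List (List Int)) (out : Int) : Decidable (Spec_solve n m grid out) := by unfold Spec_solve; infer_instance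

-- ===== CLAIM (what is proved, stated in full; the proofs are below) =====
def Claim_equal_solve : Prop := ∀ (n : Int) (m : Int) (grid : List (List Int)), Dom_solve n m grid → Pre_solve n m grid → Spec_solve n m grid (solve n m grid)

-- ===== LEMMAS AND PROOFS =====

-- reference value function: V fuel r c1 c2 is the DP value of state (r,c1,c2), fuel = (n-1-r).toNat
def V (m : Int) (grid : List (List Int)) : Nat → Int → Int → Int → Int
  | 0, r, c1, c2 => if c1 = c2 then gRow grid r c1 else gRow grid r c1 + gRow grid r c2
  | fuel+1, r, c1, c2 =>
    let choco := if c1 = c2 then gRow grid r c1 else gRow grid r c1 + gRow grid r c2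
    ([-1, 0, 1] : List Int).foldl (fun maxi d1 =>
      ([-1, 0, 1] : List Int).foldl (fun maxi d2 =>
        if 0 ≤ c1 + d1 ∧ c1 + d1 < m ∧ 0 ≤ c2 + d2 ∧ c2 + d2 < m then
          max maxi (choco + V m grid fuel (r+1) (c1+d1) (c2+d2))
        else maxi) maxi) 0

-- ---------- B side: memoized recursion computes V ----------

def InvB (n m : Int) (grid : List (List Int)) (memo : PySem.Dict (Int × Int × Int) Int) : Prop :=
  ∀ r c1 c2 v, memo.get? (r, c1, c2) = some v → v = V m grid (n - 1 - r).toNat r c1 c2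

theorem foldl_state_rel {γ σ : Type} (Inv : σ → Prop)
    (l : List γ) (cs : Int × σ → γ → Int × σ) (ps : Int → γ → Int)
    (h : ∀ st d, d ∈ l → Inv st.2 → (cs st d).1 = ps st.1 d ∧ Inv (cs st d).2) :
    ∀ st, Inv st.2 → (l.foldl cs st).1 = l.foldl ps st.1 ∧ Inv (l.foldl cs st).2 := by
  induction l with
  | nil => intro st h2; exact ⟨rfl, h2⟩
  | cons d t ih =>
    intro st h2
    have hd := h st d (List.mem_cons_self ..) h2
    have ht := ih (fun st' d' hm hi => h st' d' (List.mem_cons_of_mem _ hm) hi) (cs st d) hd.2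
    simpa [List.foldl_cons, ← hd.1] using ht

theorem recB_correct (n m : Int) (grid : List (List Int)) :
    ∀ (fuel : Nat) (r c1 c2 : Int) (memo : PySem.Dict (Int × Int × Int) Int),
      InvB n m grid memo → r < n → (n - 1 - r).toNat ≤ fuel →
      (recB n m grid fuel r c1 c2 memo).1 = V m grid (n - 1 - r).toNat r c1 c2 ∧
      InvB n m grid (recB n m grid fuel r c1 c2 memo).2 := by
  intro fuel
  induction fuel with
  | zero =>
    intro r c1 c2 memo hinv hrn hfuel
    have hr : r = n - 1 := by omega
    have h0 : (n - 1 - r).toNat = 0 := by omega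
    rw [recB]
    cases hget : memo.get? (r, c1, c2) with
    | some v => exact ⟨hinv r c1 c2 v hget, hinv⟩
    | none =>
      simp only [if_pos hr]
      constructor
      · rw [h0, V]
      · intro r' c1' c2' v hv
        rw [PySem.Dict.get?_insert] at hv
        by_cases hkey : ((r' : Int), c1', c2') = (r, c1, c2)
        · rw [if_pos hkey] at hv
          simp only [Prod.mk.injEq] at hkey
          obtain ⟨rfl, rfl, rfl⟩ := hkey
          rw [h0, V]
          exact (Option.some.inj hv).symm
        · rw [if_neg hkey] at hv
          exact hinv r' c1' c2' v hv
  | succ fuel' ih =>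
    intro r c1 c2 memo hinv hrn hfuel
    rw [recB]
    cases hget : memo.get? (r, c1, c2) with
    | some v => exact ⟨hinv r c1 c2 v hget, hinv⟩
    | none =>
      by_cases hr : r = n - 1
      · have h0 : (n - 1 - r).toNat = 0 := by omega
        simp only [if_pos hr]
        constructor
        · rw [h0, V]
        · intro r' c1' c2' v hv
          rw [PySem.Dict.get?_insert] at hv
          by_cases hkey : ((r' : Int), c1', c2') = (r, c1, c2)
          · rw [if_pos hkey] at hv
            simp only [Prod.mk.injEq] at hkey
            obtain ⟨rfl, rfl, rfl⟩ := hkey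
            rw [h0, V]
            exact (Option.some.inj hv).symm
          · rw [if_neg hkey] at hv
            exact hinv r' c1' c2' v hv
      · have hk1 : (n - 1 - r).toNat = (n - 1 - (r+1)).toNat + 1 := by omega
        simp only [if_neg hr]
        have H := foldl_state_rel (InvB n m grid) ([-1, 0, 1] : List Int)
          (fun st d1 =>
              ([-1, 0, 1] : List Int).foldl (fun st d2 =>
                if 0 ≤ c1 + d1 ∧ c1 + d1 < m ∧ 0 ≤ c2 + d2 ∧ c2 + d2 < m then
                  ((max st.1 ((if c1 = c2 then gRow grid r c1 else gRow grid r c1 + gRow grid r c2) + (recB n m grid fuel' (r + 1) (c1 + d1) (c2 + d2) st.2).1),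
                    (recB n m grid fuel' (r + 1) (c1 + d1) (c2 + d2) st.2).2))
                else st) st)
          (fun maxi d1 =>
              ([-1, 0, 1] : List Int).foldl (fun maxi d2 =>
                if 0 ≤ c1 + d1 ∧ c1 + d1 < m ∧ 0 ≤ c2 + d2 ∧ c2 + d2 < m then
                  max maxi ((if c1 = c2 then gRow grid r c1 else gRow grid r c1 + gRow grid r c2) + V m grid (n - 1 - (r+1)).toNat (r+1) (c1+d1) (c2+d2))
                else maxi) maxi)
          (by
            intro st d1 _ hinv1
            exact foldl_state_rel (InvB n m grid) ([-1, 0, 1] : List Int)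
              (fun st d2 =>
                if 0 ≤ c1 + d1 ∧ c1 + d1 < m ∧ 0 ≤ c2 + d2 ∧ c2 + d2 < m then
                  ((max st.1 ((if c1 = c2 then gRow grid r c1 else gRow grid r c1 + gRow grid r c2) + (recB n m grid fuel' (r + 1) (c1 + d1) (c2 + d2) st.2).1),
                    (recB n m grid fuel' (r + 1) (c1 + d1) (c2 + d2) st.2).2))
                else st)
              (fun maxi d2 =>
                if 0 ≤ c1 + d1 ∧ c1 + d1 < m ∧ 0 ≤ c2 + d2 ∧ c2 + d2 < m then
                  max maxi ((if c1 = c2 then gRow grid r c1 else gRow grid r c1 + gRow grid r c2) + V m grid (n - 1 - (r+1)).toNat (r+1) (c1+d1) (c2+d2))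
                else maxi)
              (by
                intro st2 d2 _ hinv2
                by_cases hgd : 0 ≤ c1 + d1 ∧ c1 + d1 < m ∧ 0 ≤ c2 + d2 ∧ c2 + d2 < m
                · simp only [if_pos hgd]
                  have hq := ih (r+1) (c1+d1) (c2+d2) st2.2 hinv2 (by omega) (by omega)
                  exact ⟨by rw [hq.1], hq.2⟩
                · simp only [if_neg hgd]
                  exact ⟨trivial, hinv2⟩)
              st hinv1)
          (0, memo) hinv
        have hval : (([-1, 0, 1] : List Int).foldl (fun (maxi : Int) d1 =>
            ([-1, 0, 1] : List Int).foldl (fun maxi d2 =>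
              if 0 ≤ c1 + d1 ∧ c1 + d1 < m ∧ 0 ≤ c2 + d2 ∧ c2 + d2 < m then
                max maxi ((if c1 = c2 then gRow grid r c1 else gRow grid r c1 + gRow grid r c2) + V m grid (n - 1 - (r+1)).toNat (r+1) (c1+d1) (c2+d2))
              else maxi) maxi) 0)
            = V m grid ((n - 1 - (r+1)).toNat + 1) r c1 c2 := by
          rw [V]
        constructor
        · rw [hk1, ← hval]
          exact H.1
        · intro r' c1' c2' v hv
          rw [PySem.Dict.get?_insert] at hv
          by_cases hkey : ((r' : Int), c1', c2') = (r, c1, c2)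
          · rw [if_pos hkey] at hv
            simp only [Prod.mk.injEq] at hkey
            obtain ⟨rfl, rfl, rfl⟩ := hkey
            rw [hk1, ← hval, ← H.1]
            exact (Option.some.inj hv).symm
          · rw [if_neg hkey] at hv
            exact H.2 r' c1' c2' v hv

theorem solveB_eq_V (n m : Int) (grid : List (List Int)) (h : Pre_solve n m grid) :
    solve_alt n m grid = V m grid (n - 1).toNat 0 0 (m - 1) := by
  obtain ⟨hn, hm, -, -⟩ := h
  have h0 : InvB n m grid PySem.Dict.empty := by
    intro r c1 c2 v hv; rw [PySem.Dict.get?_empty] at hv; cases hv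
  have := (recB_correct n m grid n.toNat 0 0 (m-1) PySem.Dict.empty h0 (by omega) (by omega)).1
  simpa [solve_alt] using this

-- ---------- A side: the table fill computes V ----------

def upd3 (f : Nat → Nat → Nat → Int) (a b c : Nat) (v : Int) : Nat → Nat → Nat → Int :=
  fun i j k => if i = a ∧ j = b ∧ k = c then v else f i j k

def Rel3 (N M : Nat) (dp : List (List (List Int))) (f : Nat → Nat → Nat → Int) : Prop :=
  dp.length = N ∧
  (∀ i, i < N → (dp.getD i []).length = M) ∧
  (∀ i j, i < N → j < M → ((dp.getD i []).getD j []).length = M) ∧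
  (∀ i j k, i < N → j < M → k < M → ((dp.getD i []).getD j []).getD k 0 = f i j k)

theorem getD_set_self {a : Type} (l : List a) (i : Nat) (v d : a) (h : i < l.length) :
    (l.set i v).getD i d = v := by
  simp [List.getD_eq_getElem?_getD, List.getElem?_set_self h]

theorem getD_set_ne {a : Type} (l : List a) (i j : Nat) (v d : a) (h : i ≠ j) :
    (l.set i v).getD j d = l.getD j d := by
  simp [List.getD_eq_getElem?_getD, List.getElem?_set_ne h]

theorem Rel3_set3 {N M : Nat} {dp : List (List (List Int))} {f : Nat → Nat → Nat → Int}
    (h : Rel3 N M dp f) (r c1 c2 : Int) (v : Int)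
    (hr : r.toNat < N) (h1 : c1.toNat < M) (h2 : c2.toNat < M) :
    Rel3 N M (set3 dp r c1 c2 v) (upd3 f r.toNat c1.toNat c2.toNat v) := by
  obtain ⟨hL, hR, hI, hV⟩ := h
  have hrdp : r.toNat < dp.length := by omega
  have hrow : (dp.getD r.toNat []).length = M := hR _ hr
  have hinn : ((dp.getD r.toNat []).getD c1.toNat []).length = M := hI _ _ hr h1
  dsimp only [set3]
  refine ⟨by simpa using hL, ?_, ?_, ?_⟩
  · intro i hi
    by_cases hir : i = r.toNat
    · subst hir; rw [getD_set_self _ _ _ _ hrdp]; simpa using hrow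
    · rw [getD_set_ne _ _ _ _ _ (fun e => hir e.symm)]; exact hR _ hi
  · intro i j hi hj
    by_cases hir : i = r.toNat
    · subst hir; rw [getD_set_self _ _ _ _ hrdp]
      by_cases hjc : j = c1.toNat
      · subst hjc; rw [getD_set_self _ _ _ _ (by omega)]; simpa using hinn
      · rw [getD_set_ne _ _ _ _ _ (fun e => hjc e.symm)]; exact hI _ _ hi hj
    · rw [getD_set_ne _ _ _ _ _ (fun e => hir e.symm)]; exact hI _ _ hi hj
  · intro i j k hi hj hk
    unfold upd3
    by_cases hir : i = r.toNat
    · subst hir; rw [getD_set_self _ _ _ _ hrdp]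
      by_cases hjc : j = c1.toNat
      · subst hjc; rw [getD_set_self _ _ _ _ (by omega)]
        by_cases hkc : k = c2.toNat
        · subst hkc; rw [getD_set_self _ _ _ _ (by omega)]
          simp
        · rw [getD_set_ne _ _ _ _ _ (fun e => hkc e.symm)]
          rw [if_neg (by tauto)]; exact hV _ _ _ hi hj hk
      · rw [getD_set_ne _ _ _ _ _ (fun e => hjc e.symm)]
        rw [if_neg (by tauto)]; exact hV _ _ _ hi hj hk
    · rw [getD_set_ne _ _ _ _ _ (fun e => hir e.symm)]
      rw [if_neg (by tauto)]; exact hV _ _ _ hi hj hk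

theorem foldl_rel {α β γ : Type} (R : α → β → Prop) (l : List γ) (f : α → γ → α) (g : β → γ → β)
    (h : ∀ a b d, d ∈ l → R a b → R (f a d) (g b d)) :
    ∀ a b, R a b → R (l.foldl f a) (l.foldl g b) := by
  induction l with
  | nil => intro a b hab; exact hab
  | cons d t ih =>
    intro a b hab
    exact ih (fun a' b' d' hm => h a' b' d' (List.mem_cons_of_mem _ hm)) _ _
      (h a b d (List.mem_cons_self ..) hab)

-- the abstract (function-space) mirror of the body of A's innermost write
def bodyA (n m : Int) (grid : List (List Int)) (f : Nat → Nat → Nat → Int) (r c1 c2 : Int) : Int :=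
  if r = n - 1 then (if c1 = c2 then gRow grid r c1 else gRow grid r c1 + gRow grid r c2)
  else
    let choco := if c1 = c2 then gRow grid r c1 else gRow grid r c1 + gRow grid r c2
    (PySem.List.pyRange 0 3 1).foldl (fun maxi i =>
      (PySem.List.pyRange 0 3 1).foldl (fun maxi j =>
        let di := ([-1, 0, 1] : List Int).getD i.toNat 0
        let dj := ([-1, 0, 1] : List Int).getD j.toNat 0
        if 0 ≤ c1 + di ∧ c1 + di < m ∧ 0 ≤ c2 + dj ∧ c2 + dj < m then
          max maxi (choco + f (r+1).toNat (c1+di).toNat (c2+dj).toNat)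
        else maxi) maxi) 0

def stepRow (n m : Int) (grid : List (List Int)) (f : Nat → Nat → Nat → Int) (r : Int) :
    Nat → Nat → Nat → Int :=
  (PySem.List.pyRange 0 m 1).foldl (fun f c1 =>
    (PySem.List.pyRange 0 m 1).foldl (fun f c2 =>
      upd3 f r.toNat c1.toNat c2.toNat (bodyA n m grid f r c1 c2)) f) f

def GoodRows (n m : Int) (grid : List (List Int)) (f : Nat → Nat → Nat → Int) (r : Int) : Prop :=
  ∀ r', r ≤ r' → r' < n → ∀ a b : Int, 0 ≤ a → a < m → 0 ≤ b → b < m →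
    f r'.toNat a.toNat b.toNat = V m grid (n - 1 - r').toNat r' a b

theorem bodyA_congr {n m : Int} {grid : List (List Int)} {f g : Nat → Nat → Nat → Int}
    (r c1 c2 : Int) (h : ∀ j k, f (r+1).toNat j k = g (r+1).toNat j k) :
    bodyA n m grid f r c1 c2 = bodyA n m grid g r c1 c2 := by
  unfold bodyA
  by_cases hr : r = n - 1
  · rw [if_pos hr, if_pos hr]
  · rw [if_neg hr, if_neg hr]
    refine PySem.List.foldl_congr_mem _ _ _ _ (fun acc i _ => ?_)
    refine PySem.List.foldl_congr_mem _ _ _ _ (fun acc2 j _ => ?_)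
    dsimp only
    rw [h]

theorem fold3_bridge (m c1 c2 choco : Int) (F : Int → Int → Int) :
    (PySem.List.pyRange 0 3 1).foldl (fun maxi i =>
      (PySem.List.pyRange 0 3 1).foldl (fun maxi j =>
        let di := ([-1, 0, 1] : List Int).getD i.toNat 0
        let dj := ([-1, 0, 1] : List Int).getD j.toNat 0
        if 0 ≤ c1 + di ∧ c1 + di < m ∧ 0 ≤ c2 + dj ∧ c2 + dj < m then
          max maxi (choco + F (c1+di) (c2+dj))
        else maxi) maxi) 0
  = ([-1, 0, 1] : List Int).foldl (fun maxi d1 =>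
      ([-1, 0, 1] : List Int).foldl (fun maxi d2 =>
        if 0 ≤ c1 + d1 ∧ c1 + d1 < m ∧ 0 ≤ c2 + d2 ∧ c2 + d2 < m then
          max maxi (choco + F (c1+d1) (c2+d2))
        else maxi) maxi) 0 := by
  rw [show PySem.List.pyRange 0 3 1 = [0, 1, 2] from by decide]
  simp only [List.foldl_cons, List.foldl_nil]
  simp only [show ([-1, 0, 1] : List Int).getD ((0 : Int).toNat) 0 = -1 from rfl,
    show ([-1, 0, 1] : List Int).getD ((1 : Int).toNat) 0 = 0 from rfl,
    show ([-1, 0, 1] : List Int).getD ((2 : Int).toNat) 0 = 1 from rfl]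

theorem bodyA_V {n m : Int} {grid : List (List Int)} {f : Nat → Nat → Nat → Int}
    (r c1 c2 : Int) (_hr0 : 0 ≤ r) (hrn : r ≤ n - 1)
    (hg : GoodRows n m grid f (r+1)) :
    bodyA n m grid f r c1 c2 = V m grid (n - 1 - r).toNat r c1 c2 := by
  by_cases hr : r = n - 1
  · have h0 : (n - 1 - r).toNat = 0 := by omega
    rw [h0]; unfold bodyA; rw [if_pos hr]; rw [V]
  · have hk1 : (n - 1 - r).toNat = (n - 2 - r).toNat + 1 := by omega
    have hkr : (n - 1 - (r+1)).toNat = (n - 2 - r).toNat := by omega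
    rw [hk1]
    unfold bodyA; rw [if_neg hr]
    calc ((PySem.List.pyRange 0 3 1).foldl _ 0 : Int)
        = ([-1, 0, 1] : List Int).foldl (fun maxi d1 =>
            ([-1, 0, 1] : List Int).foldl (fun maxi d2 =>
              if 0 ≤ c1 + d1 ∧ c1 + d1 < m ∧ 0 ≤ c2 + d2 ∧ c2 + d2 < m then
                max maxi ((if c1 = c2 then gRow grid r c1 else gRow grid r c1 + gRow grid r c2)
                  + f (r+1).toNat (c1+d1).toNat (c2+d2).toNat)
              else maxi) maxi) 0 :=
          fold3_bridge m c1 c2 _ (fun x y => f (r+1).toNat x.toNat y.toNat)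
      _ = V m grid ((n - 2 - r).toNat + 1) r c1 c2 := by
          rw [V]
          refine PySem.List.foldl_congr_mem _ _ _ _ (fun acc d1 hd1 => ?_)
          refine PySem.List.foldl_congr_mem _ _ _ _ (fun acc2 d2 hd2 => ?_)
          dsimp only
          by_cases hgd : 0 ≤ c1 + d1 ∧ c1 + d1 < m ∧ 0 ≤ c2 + d2 ∧ c2 + d2 < m
          · rw [if_pos hgd, if_pos hgd]
            have := hg (r+1) (le_refl _) (by omega) (c1+d1) (c2+d2)
              hgd.1 hgd.2.1 hgd.2.2.1 hgd.2.2.2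
            rw [this, hkr]
          · rw [if_neg hgd, if_neg hgd]

-- evaluation of the abstract inner (c2) loop
theorem c2fold_eval (n m : Int) (grid : List (List Int)) (r c1 : Int) (hr0 : 0 ≤ r)
    (f0 : Nat → Nat → Nat → Int) :
    ∀ (cs : List Int) (f : Nat → Nat → Nat → Int), cs.Nodup → (∀ x ∈ cs, 0 ≤ x) →
    (∀ j k, f (r+1).toNat j k = f0 (r+1).toNat j k) →
    (∀ i j k, i ≠ r.toNat →
      (cs.foldl (fun f c2 => upd3 f r.toNat c1.toNat c2.toNat (bodyA n m grid f r c1 c2)) f) i j k = f i j k) ∧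
    (∀ j k, j ≠ c1.toNat →
      (cs.foldl (fun f c2 => upd3 f r.toNat c1.toNat c2.toNat (bodyA n m grid f r c1 c2)) f) r.toNat j k = f r.toNat j k) ∧
    (∀ c2 ∈ cs,
      (cs.foldl (fun f c2 => upd3 f r.toNat c1.toNat c2.toNat (bodyA n m grid f r c1 c2)) f) r.toNat c1.toNat c2.toNat = bodyA n m grid f0 r c1 c2) ∧
    (∀ k, (∀ c2 ∈ cs, c2.toNat ≠ k) →
      (cs.foldl (fun f c2 => upd3 f r.toNat c1.toNat c2.toNat (bodyA n m grid f r c1 c2)) f) r.toNat c1.toNat k = f r.toNat c1.toNat k) := by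
  intro cs
  induction cs with
  | nil => intro f _ _ _; exact ⟨fun _ _ _ _ => rfl, fun _ _ _ => rfl, fun c2 h => absurd h (List.not_mem_nil), fun _ _ => rfl⟩
  | cons c t ih =>
    intro f hnd hnn hagree
    have hr1 : (r+1).toNat ≠ r.toNat := by omega
    set f1 := upd3 f r.toNat c1.toNat c.toNat (bodyA n m grid f r c1 c) with hf1
    have hf1agree : ∀ j k, f1 (r+1).toNat j k = f0 (r+1).toNat j k := by
      intro j k; rw [hf1]; unfold upd3; rw [if_neg (by tauto)]; exact hagree j k
    have IH := ih f1 (List.nodup_cons.mp hnd).2 (fun x hx => hnn x (List.mem_cons_of_mem _ hx)) hf1agree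
    have hcnn : 0 ≤ c := hnn c (List.mem_cons_self ..)
    have hcnt : c ∉ t := (List.nodup_cons.mp hnd).1
    refine ⟨?_, ?_, ?_, ?_⟩
    · intro i j k hi
      rw [List.foldl_cons, IH.1 i j k hi, hf1]; unfold upd3; rw [if_neg (by tauto)]
    · intro j k hj
      rw [List.foldl_cons, IH.2.1 j k hj, hf1]; unfold upd3; rw [if_neg (by tauto)]
    · intro c2 hc2
      rcases List.mem_cons.mp hc2 with hh | hh
      · subst hh
        have hnt : ∀ x ∈ t, x.toNat ≠ c2.toNat := by
          intro x hx
          have := hnn x (List.mem_cons_of_mem _ hx)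
          have hne : x ≠ c2 := fun e => hcnt (e ▸ hx)
          omega
        rw [List.foldl_cons, IH.2.2.2 c2.toNat hnt, hf1]; unfold upd3
        rw [if_pos ⟨rfl, rfl, rfl⟩]
        exact bodyA_congr r c1 c2 hagree
      · rw [List.foldl_cons]; exact IH.2.2.1 c2 hh
    · intro k hk
      rw [List.foldl_cons, IH.2.2.2 k (fun x hx => hk x (List.mem_cons_of_mem _ hx)), hf1]
      unfold upd3
      rw [if_neg (by rintro ⟨-, -, e⟩; exact hk c (List.mem_cons_self ..) e.symm)]

-- evaluation of the abstract outer (c1) loop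
theorem c1fold_eval (n m : Int) (grid : List (List Int)) (r : Int) (hr0 : 0 ≤ r)
    (f0 : Nat → Nat → Nat → Int) :
    ∀ (cs : List Int) (f : Nat → Nat → Nat → Int), cs.Nodup → (∀ x ∈ cs, 0 ≤ x) →
    (∀ j k, f (r+1).toNat j k = f0 (r+1).toNat j k) →
    (∀ i j k, i ≠ r.toNat →
      (cs.foldl (fun f c1 => (PySem.List.pyRange 0 m 1).foldl (fun f c2 => upd3 f r.toNat c1.toNat c2.toNat (bodyA n m grid f r c1 c2)) f) f) i j k = f i j k) ∧
    (∀ c1 ∈ cs, ∀ c2 : Int, 0 ≤ c2 → c2 < m →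
      (cs.foldl (fun f c1 => (PySem.List.pyRange 0 m 1).foldl (fun f c2 => upd3 f r.toNat c1.toNat c2.toNat (bodyA n m grid f r c1 c2)) f) f) r.toNat c1.toNat c2.toNat = bodyA n m grid f0 r c1 c2) ∧
    (∀ j, (∀ c1 ∈ cs, c1.toNat ≠ j) → ∀ k,
      (cs.foldl (fun f c1 => (PySem.List.pyRange 0 m 1).foldl (fun f c2 => upd3 f r.toNat c1.toNat c2.toNat (bodyA n m grid f r c1 c2)) f) f) r.toNat j k = f r.toNat j k) := by
  intro cs
  induction cs with
  | nil => intro f _ _ _; exact ⟨fun _ _ _ _ => rfl, fun c1 h => absurd h (List.not_mem_nil), fun _ _ _ => rfl⟩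
  | cons c t ih =>
    intro f hnd hnn hagree
    set f1 := (PySem.List.pyRange 0 m 1).foldl (fun f c2 => upd3 f r.toNat c.toNat c2.toNat (bodyA n m grid f r c c2)) f with hf1
    have C := c2fold_eval n m grid r c hr0 f0 (PySem.List.pyRange 0 m 1) f
      (PySem.List.nodup_pyRange_one 0 m) (fun x hx => (PySem.List.mem_pyRange_one.mp hx).1) hagree
    have hf1agree : ∀ j k, f1 (r+1).toNat j k = f0 (r+1).toNat j k := by
      intro j k; rw [hf1, C.1 _ j k (by omega)]; exact hagree j k
    have IH := ih f1 (List.nodup_cons.mp hnd).2 (fun x hx => hnn x (List.mem_cons_of_mem _ hx)) hf1agree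
    have hcnn : 0 ≤ c := hnn c (List.mem_cons_self ..)
    have hcnt : c ∉ t := (List.nodup_cons.mp hnd).1
    refine ⟨?_, ?_, ?_⟩
    · intro i j k hi
      rw [List.foldl_cons, IH.1 i j k hi, hf1, C.1 i j k hi]
    · intro c1 hc1 c2 hc20 hc2m
      rcases List.mem_cons.mp hc1 with hh | hh
      · subst hh
        have hnt : ∀ x ∈ t, x.toNat ≠ c1.toNat := by
          intro x hx
          have := hnn x (List.mem_cons_of_mem _ hx)
          have hne : x ≠ c1 := fun e => hcnt (e ▸ hx)
          omega
        rw [List.foldl_cons, IH.2.2 c1.toNat hnt, hf1]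
        exact C.2.2.1 c2 (PySem.List.mem_pyRange_one.mpr ⟨hc20, hc2m⟩)
      · rw [List.foldl_cons]; exact IH.2.1 c1 hh c2 hc20 hc2m
    · intro j hj k
      rw [List.foldl_cons, IH.2.2 j (fun x hx => hj x (List.mem_cons_of_mem _ hx)), hf1]
      exact C.2.1 j k (Ne.symm (hj c (List.mem_cons_self ..)))

theorem stepRow_good {n m : Int} {grid : List (List Int)} {f : Nat → Nat → Nat → Int}
    (r : Int) (hr0 : 0 ≤ r) (hrn : r ≤ n - 1) (hg : GoodRows n m grid f (r+1)) :
    GoodRows n m grid (stepRow n m grid f r) r := by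
  have C := c1fold_eval n m grid r hr0 f (PySem.List.pyRange 0 m 1) f
    (PySem.List.nodup_pyRange_one 0 m) (fun x hx => (PySem.List.mem_pyRange_one.mp hx).1)
    (fun _ _ => rfl)
  intro r' hle hlt a b ha0 ham hb0 hbm
  by_cases hrr : r' = r
  · subst hrr
    unfold stepRow
    rw [C.2.1 a (PySem.List.mem_pyRange_one.mpr ⟨ha0, ham⟩) b hb0 hbm]
    exact bodyA_V r' a b hr0 hrn hg
  · have : r'.toNat ≠ r.toNat := by omega
    unfold stepRow
    rw [C.1 r'.toNat a.toNat b.toNat this]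
    exact hg r' (by omega) hlt a b ha0 ham hb0 hbm

theorem rloop (n m : Int) (grid : List (List Int)) :
    ∀ (k : Nat) (r : Int) (f : Nat → Nat → Nat → Int), r + 1 = (k : Int) → r ≤ n - 1 →
    GoodRows n m grid f (r+1) →
    GoodRows n m grid ((PySem.List.pyRange r (-1) (-1)).foldl (fun f r => stepRow n m grid f r) f) 0 := by
  intro k
  induction k with
  | zero =>
    intro r f hk hrn hg
    rw [PySem.List.pyRange_neg_one_eq_nil (by omega)]
    have : r + 1 = 0 := by omega
    simpa [List.foldl_nil, ← this] using hg
  | succ k ih =>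
    intro r f hk hrn hg
    rw [PySem.List.pyRange_neg_one_cons (by omega : (-1 : Int) < r), List.foldl_cons]
    have h1 := stepRow_good r (by omega) hrn hg
    have h2 : GoodRows n m grid (stepRow n m grid f r) ((r-1)+1) := by
      have : (r-1)+1 = r := by omega
      rwa [this]
    exact ih (r-1) _ (by omega) (by omega) h2

theorem getD_const_map {a b : Type} (l : List a) (c : b) (d : b) (i : Nat) (h : i < l.length) :
    (l.map (fun _ => c)).getD i d = c := by
  rw [List.getD_eq_getElem?_getD, List.getElem?_map, List.getElem?_eq_getElem h]
  rfl

set_option maxHeartbeats 2000000 in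
theorem solveA_eq_V (n m : Int) (grid : List (List Int)) (h : Pre_solve n m grid) :
    solve n m grid = V m grid (n - 1).toNat 0 0 (m - 1) := by
  obtain ⟨hn, hm, hlen, hrows⟩ := h
  have hrel0 : Rel3 n.toNat m.toNat
      ((PySem.List.pyRange 0 n 1).map (fun _ =>
        (PySem.List.pyRange 0 m 1).map (fun _ =>
          (PySem.List.pyRange 0 m 1).map (fun _ => (-1 : Int)))))
      (fun _ _ _ => (-1 : Int)) := by
    have hln : (PySem.List.pyRange 0 n 1).length = n.toNat := by
      rw [PySem.List.length_pyRange_one]; omega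
    have hlm : (PySem.List.pyRange 0 m 1).length = m.toNat := by
      rw [PySem.List.length_pyRange_one]; omega
    refine ⟨by simp [hln], ?_, ?_, ?_⟩
    · intro i hi
      rw [getD_const_map _ _ _ _ (by omega)]
      simp [hlm]
    · intro i j hi hj
      rw [getD_const_map _ _ _ _ (by omega), getD_const_map _ _ _ _ (by omega)]
      simp [hlm]
    · intro i j k hi hj hk
      rw [getD_const_map _ _ _ _ (by omega), getD_const_map _ _ _ _ (by omega),
        getD_const_map _ _ _ _ (by omega)]
  have hpair := foldl_rel (Rel3 n.toNat m.toNat) (PySem.List.pyRange (n-1) (-1) (-1))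
    (fun dp (r : Int) =>
        (PySem.List.pyRange 0 m 1).foldl (fun dp (c1 : Int) =>
          (PySem.List.pyRange 0 m 1).foldl (fun dp (c2 : Int) =>
            if r = n - 1 then
              if c1 = c2 then set3 dp r c1 c2 (gRow grid r c1)
              else set3 dp r c1 c2 (gRow grid r c1 + gRow grid r c2)
            else
              set3 dp r c1 c2
                ((PySem.List.pyRange 0 3 1).foldl (fun maxi i =>
                  (PySem.List.pyRange 0 3 1).foldl (fun maxi j =>
                    if 0 ≤ c1 + ([-1, 0, 1] : List Int).getD i.toNat 0 ∧
                        c1 + ([-1, 0, 1] : List Int).getD i.toNat 0 < m ∧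
                        0 ≤ c2 + ([-1, 0, 1] : List Int).getD j.toNat 0 ∧
                        c2 + ([-1, 0, 1] : List Int).getD j.toNat 0 < m then
                      max maxi
                        ((if c1 = c2 then gRow grid r c1 else gRow grid r c1 + gRow grid r c2) +
                          get3 dp (r + 1) (c1 + ([-1, 0, 1] : List Int).getD i.toNat 0)
                            (c2 + ([-1, 0, 1] : List Int).getD j.toNat 0))
                    else maxi) maxi) 0)) dp) dp)
    (fun f r => stepRow n m grid f r)
    (by
        intro dp f r hrmem hrel
        obtain ⟨hrlo, hrhi⟩ := PySem.List.mem_pyRange_neg_one.mp hrmem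
        unfold stepRow
        refine foldl_rel (Rel3 n.toNat m.toNat) _ _ _ ?_ dp f hrel
        intro dp1 f1 c1 hc1 hrel1
        refine foldl_rel (Rel3 n.toNat m.toNat) _ _ _ ?_ dp1 f1 hrel1
        intro dp2 f2 c2 hc2 hrel2
        obtain ⟨hc1lo, hc1hi⟩ := PySem.List.mem_pyRange_one.mp hc1
        obtain ⟨hc2lo, hc2hi⟩ := PySem.List.mem_pyRange_one.mp hc2
        have hrN : r.toNat < n.toNat := by omega
        have h1M : c1.toNat < m.toNat := by omega
        have h2M : c2.toNat < m.toNat := by omega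
        by_cases hb : r = n - 1
        · by_cases hcc : c1 = c2
          · rw [if_pos hb, if_pos hcc]
            have hbody : bodyA n m grid f2 r c1 c2 = gRow grid r c1 := by
              unfold bodyA; rw [if_pos hb, if_pos hcc]
            rw [hbody]
            exact Rel3_set3 hrel2 r c1 c2 _ hrN h1M h2M
          · rw [if_pos hb, if_neg hcc]
            have hbody : bodyA n m grid f2 r c1 c2 = gRow grid r c1 + gRow grid r c2 := by
              unfold bodyA; rw [if_pos hb, if_neg hcc]
            rw [hbody]
            exact Rel3_set3 hrel2 r c1 c2 _ hrN h1M h2M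
        · rw [if_neg hb]
          have hbody : bodyA n m grid f2 r c1 c2 =
              ((PySem.List.pyRange 0 3 1).foldl (fun maxi i =>
                (PySem.List.pyRange 0 3 1).foldl (fun maxi j =>
                  if 0 ≤ c1 + ([-1, 0, 1] : List Int).getD i.toNat 0 ∧
                      c1 + ([-1, 0, 1] : List Int).getD i.toNat 0 < m ∧
                      0 ≤ c2 + ([-1, 0, 1] : List Int).getD j.toNat 0 ∧
                      c2 + ([-1, 0, 1] : List Int).getD j.toNat 0 < m then
                    max maxi
                      ((if c1 = c2 then gRow grid r c1 else gRow grid r c1 + gRow grid r c2) +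
                        get3 dp2 (r + 1) (c1 + ([-1, 0, 1] : List Int).getD i.toNat 0)
                          (c2 + ([-1, 0, 1] : List Int).getD j.toNat 0))
                  else maxi) maxi) 0) := by
            unfold bodyA; rw [if_neg hb]
            dsimp only
            refine PySem.List.foldl_congr_mem _ _ _ _ (fun acc i _ => ?_)
            refine PySem.List.foldl_congr_mem _ _ _ _ (fun acc2 j _ => ?_)
            dsimp only
            by_cases hgd : 0 ≤ c1 + ([-1, 0, 1] : List Int).getD i.toNat 0 ∧
                c1 + ([-1, 0, 1] : List Int).getD i.toNat 0 < m ∧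
                0 ≤ c2 + ([-1, 0, 1] : List Int).getD j.toNat 0 ∧
                c2 + ([-1, 0, 1] : List Int).getD j.toNat 0 < m
            · rw [if_pos hgd, if_pos hgd]
              obtain ⟨g1, g2, g3, g4⟩ := hgd
              rw [show get3 dp2 (r + 1) (c1 + ([-1, 0, 1] : List Int).getD i.toNat 0)
                  (c2 + ([-1, 0, 1] : List Int).getD j.toNat 0)
                  = f2 (r+1).toNat (c1 + ([-1, 0, 1] : List Int).getD i.toNat 0).toNat
                      (c2 + ([-1, 0, 1] : List Int).getD j.toNat 0).toNat from by
                unfold get3; exact hrel2.2.2.2 _ _ _ (by omega) (by omega) (by omega)]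
            · rw [if_neg hgd, if_neg hgd]
          rw [hbody]
          exact Rel3_set3 hrel2 r c1 c2 _ hrN h1M h2M
)
    ((PySem.List.pyRange 0 n 1).map (fun _ =>
      (PySem.List.pyRange 0 m 1).map (fun _ =>
        (PySem.List.pyRange 0 m 1).map (fun _ => (-1 : Int)))))
    (fun _ _ _ => (-1 : Int)) hrel0
  have hGood := rloop n m grid n.toNat (n-1) (fun _ _ _ => (-1 : Int)) (by omega) (by omega)
    (by intro r' h1 h2 a b _ _ _ _; exact absurd h2 (by omega))
  dsimp only [solve]
  rw [PySem.List.pyGetD_zero]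
  rw [PySem.List.pyGetD_zero]
  have hLen := hpair.2.2.1 0 0 (by omega) (by omega)
  rw [PySem.List.pyGetD_neg_ofNat _ 1 0 (by omega) (by rw [hLen]; omega)]
  rw [← List.getD_eq_getElem _ 0 (by rw [hLen]; omega)]
  rw [hLen]
  have h4 := hpair.2.2.2 0 0 (m.toNat - 1) (by omega) (by omega) (by omega)
  rw [h4]
  have hV0 := hGood 0 (le_refl 0) (by omega) 0 (m-1) (le_refl 0) (by omega) (by omega) (by omega)
  have e1 : ((0 : Int)).toNat = 0 := rfl
  have e2 : ((m - 1 : Int)).toNat = m.toNat - 1 := by omega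
  have e3 : (n - 1 - 0 : Int) = n - 1 := by ring
  rw [e1, e2, e3] at hV0
  exact hV0

-- ===== VERDICT (by name: the statement is the Claim_ definition above) =====
theorem solve_spec : Claim_equal_solve := by
  intro n m grid _ hpre
  unfold Spec_solve
  rw [solveA_eq_V n m grid hpre, solveB_eq_V n m grid hpre]
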